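-- pv_equiv track=rewrite | github.com/xorlatumaku/ThinkPython | Chapter10/duplicate_checker.py | find_no_duplicate_words
-- ===== SOURCE A (Python) =====
-- def has_duplicates(sequence):
--     """
--     Check if any element in the sequence appears more than once.
--     Returns True if there are duplicates, False otherwise.
--     """
--     return len(sequence) != len(set(sequence))
--
-- def find_no_duplicate_words(word_list):
--     """
--     Find all words where each letter appears only once.
--     Returns a dictionary with word lengths as keys and lists of words as values.
--     """
--
--     result = {}
--     for word in word_list:
--         # Convert to lowercase to handle case-insensitive comparison
--         word = word.lower().strip()
--         if not has_duplicates(word):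
--             length = len(word)
--             if length not in result:
--                 result[length] =[]
--             result[length].append(word)
--     return result
-- ===== SOURCE B (Python) =====
-- def find_no_duplicate_words(word_list):
--     """
--     Find all words where each letter appears only once.
--     Returns a dictionary with word lengths as keys and lists of words as values.
--     """
--     filtered = [w for w in (word.lower().strip() for word in word_list)
--                 if len(w) == len(set(w))]
--     keys = list(dict.fromkeys(len(w) for w in filtered))
--     return {k: [w for w in filtered if len(w) == k] for k in keys}
-- ===== Notes on version B (the rewrite author's own statement) =====
-- stated objective: alternative
-- what changed: Replaced A's single-pass dict accumulation (setdefault-style insert + append per word) with a filter-then-group pipeline: build the filtered normalized word list once, dedup its lengths in first-seen order, and emit each group with one comprehension scan per distinct length.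
import Mathlib
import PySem

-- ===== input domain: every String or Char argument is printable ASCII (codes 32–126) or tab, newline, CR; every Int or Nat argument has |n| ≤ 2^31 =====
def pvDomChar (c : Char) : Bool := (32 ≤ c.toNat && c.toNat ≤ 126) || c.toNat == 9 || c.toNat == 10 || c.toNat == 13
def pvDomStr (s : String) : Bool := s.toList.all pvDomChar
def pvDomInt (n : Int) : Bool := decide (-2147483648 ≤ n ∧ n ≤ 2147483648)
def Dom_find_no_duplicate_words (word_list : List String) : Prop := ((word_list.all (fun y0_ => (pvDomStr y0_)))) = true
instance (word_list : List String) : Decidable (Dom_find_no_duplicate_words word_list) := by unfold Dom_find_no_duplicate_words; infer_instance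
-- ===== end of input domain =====

-- B replaces A's single-pass dict accumulation by filter-then-group (dedup of lengths, then one scan per length); alternative decomposition, same results.

-- ===== PORT A =====
-- has_duplicates(sequence): len(sequence) != len(set(sequence))
def has_duplicates (sequence : String) : Bool :=
  PySem.Str.len sequence != ((PySem.Set.ofList sequence.toList).length : Int)

def find_no_duplicate_words (word_list : List String) : List (Int × List String) :=
  (word_list.foldl
    (fun (result : PySem.Dict Int (List String)) word =>
      let w := PySem.Str.strip (PySem.Str.lower word)
      if !(has_duplicates w) then
        let length := PySem.Str.len w
        let result := if result.contains length then result else result.insert length []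
        result.modify length [] (fun l => l ++ [w])   -- result[length].append(word)
      else result)
    PySem.Dict.empty).items

-- ===== PORT B =====
def find_no_duplicate_words_alt (word_list : List String) : List (Int × List String) :=
  let filtered := (word_list.map (fun word => PySem.Str.strip (PySem.Str.lower word))).filter
      (fun w => PySem.Str.len w == ((PySem.Set.ofList w.toList).length : Int))
  let keys := PySem.List.dedup (filtered.map PySem.Str.len)
  keys.map (fun k => (k, filtered.filter (fun w => PySem.Str.len w == k)))

-- ===== PRECONDITION & SPEC =====
def Spec_find_no_duplicate_words (word_list : List String) (out : List (Int × List String)) : Prop := out = find_no_duplicate_words_alt word_list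
instance (word_list : List String) (out : List (Int × List String)) : Decidable (Spec_find_no_duplicate_words word_list out) := by unfold Spec_find_no_duplicate_words; infer_instance

-- ===== CLAIM (what is proved, stated in full; the proofs are below) =====
def Claim_equal_find_no_duplicate_words : Prop := ∀ (word_list : List String), Dom_find_no_duplicate_words word_list → Spec_find_no_duplicate_words word_list (find_no_duplicate_words word_list)

-- ===== LEMMAS AND PROOFS =====

-- A's setdefault-then-append step is a single `modify` with default [].
theorem step_eq_modify (d : PySem.Dict Int (List String)) (k : Int) (w : String) :
    ((if d.contains k then d else d.insert k []).modify k [] (fun l => l ++ [w]))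
      = d.modify k [] (fun l => l ++ [w]) := by
  by_cases h : d.contains k = true
  · simp [h]
  · simp only [Bool.not_eq_true] at h
    simp [h, PySem.Dict.modify, PySem.Dict.getD_insert_self,
      PySem.Dict.insert_insert_self, PySem.Dict.getD_of_not_contains d ([] : List String) h]

-- A's loop over word_list equals the plain modify-loop over B's filtered list.
theorem fold_filter (l : List String) (d : PySem.Dict Int (List String)) :
    l.foldl
      (fun (result : PySem.Dict Int (List String)) word =>
        let w := PySem.Str.strip (PySem.Str.lower word)
        if !(has_duplicates w) then
          let length := PySem.Str.len w
          let result := if result.contains length then result else result.insert length []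
          result.modify length [] (fun l => l ++ [w])
        else result) d
    = ((l.map (fun word => PySem.Str.strip (PySem.Str.lower word))).filter
        (fun w => PySem.Str.len w == ((PySem.Set.ofList w.toList).length : Int))).foldl
        (fun d w => d.modify (PySem.Str.len w) [] (fun l => l ++ [w])) d := by
  induction l generalizing d with
  | nil => simp
  | cons x xs ih =>
    simp only [List.map_cons, List.filter_cons, List.foldl_cons]
    cases hc : (PySem.Str.len (PySem.Str.strip (PySem.Str.lower x))
        == ((PySem.Set.ofList (PySem.Str.strip (PySem.Str.lower x)).toList).length : Int)) with
    | true =>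
      have hd : has_duplicates (PySem.Str.strip (PySem.Str.lower x)) = false := by
        simp only [has_duplicates, bne, hc, Bool.not_true]
      simp only [hd, Bool.not_false, if_true, List.foldl_cons]
      rw [step_eq_modify]
      exact ih _
    | false =>
      have hd : has_duplicates (PySem.Str.strip (PySem.Str.lower x)) = true := by
        simp only [has_duplicates, bne, hc, Bool.not_false]
      simp only [hd, Bool.not_true]
      exact ih d

-- ===== VERDICT (by name: the statement is the Claim_ definition above) =====
theorem find_no_duplicate_words_spec : Claim_equal_find_no_duplicate_words := by
  intro word_list _
  unfold Spec_find_no_duplicate_words find_no_duplicate_words find_no_duplicate_words_alt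
  rw [fold_filter]
  set l := ((word_list.map (fun word => PySem.Str.strip (PySem.Str.lower word))).filter
      (fun w => PySem.Str.len w == ((PySem.Set.ofList w.toList).length : Int))) with hl
  have hnd : (l.foldl (fun d w => d.modify (PySem.Str.len w) [] (fun l => l ++ [w]))
      PySem.Dict.empty).keys.Nodup :=
    PySem.Dict.nodup_keys_foldl_modify_key l PySem.Str.len []
      (fun _ w l => l ++ [w]) PySem.Dict.empty (by simp)
  have hkeys : (l.foldl (fun d w => d.modify (PySem.Str.len w) [] (fun l => l ++ [w]))
      PySem.Dict.empty).keys = PySem.Set.update PySem.Dict.empty.keys (l.map PySem.Str.len) :=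
    PySem.Dict.keys_foldl_modify_key l PySem.Str.len []
      (fun _ w l => l ++ [w]) PySem.Dict.empty
  rw [PySem.Dict.items_eq_map_keys _ hnd ([] : List String), hkeys,
    PySem.Dict.keys_empty, PySem.Set.update_nil_left, ← PySem.List.dedup_eq_ofList]
  apply List.map_congr_left
  intro k _
  congr 1
  have hmap : l.foldl (fun d w => d.modify (PySem.Str.len w) [] (fun l => l ++ [w]))
      PySem.Dict.empty
      = (l.map (fun w => (PySem.Str.len w, w))).foldl
          (fun d p => d.modify p.1 [] (fun l => l ++ [p.2])) PySem.Dict.empty := by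
    rw [List.foldl_map]
  rw [hmap, PySem.Dict.getD_foldl_modify_append]
  simp [PySem.Dict.getD_empty, List.filter_map, Function.comp_def]
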